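-- pv_equiv track=rewrite | github.com/18Chey/Python-Projects | trees.py | binary_search_list
-- ===== SOURCE A (Python) =====
-- def binary_search_list(data: list[int]) -> list[int]:
--     """Orders data list in optimal insert order for BST"""
--     data.sort()
--     length = len(data)
--
--     # Base cases
--     if length == 0:
--         return []
--     elif length == 1:
--         return [data[0]]
--
--     mid = length // 2
--     result = []
--
--     result.append(data[mid])
--     result.extend(binary_search_list(data[:mid]))
--     result.extend(binary_search_list(data[mid + 1 :]))
--
--     return result
-- ===== SOURCE B (Python) =====
-- def binary_search_list(data: list[int]) -> list[int]:
--     """Orders data list in optimal insert order for BST"""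
--     data.sort()
--     result = []
--     stack = [(0, len(data))]
--     while stack:
--         lo, hi = stack.pop()
--         if hi <= lo:
--             continue
--         mid = lo + (hi - lo) // 2
--         result.append(data[mid])
--         stack.append((mid + 1, hi))
--         stack.append((lo, mid))
--     return result
-- ===== Notes on version B (the rewrite author's own statement) =====
-- stated objective: alternative
-- what changed: Replaces A's recursion with repeated slicing/re-sorting of sublists by a single sort followed by an iterative explicit stack of (lo, hi) index ranges over the sorted list, appending to one result accumulator.
import Mathlib
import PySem

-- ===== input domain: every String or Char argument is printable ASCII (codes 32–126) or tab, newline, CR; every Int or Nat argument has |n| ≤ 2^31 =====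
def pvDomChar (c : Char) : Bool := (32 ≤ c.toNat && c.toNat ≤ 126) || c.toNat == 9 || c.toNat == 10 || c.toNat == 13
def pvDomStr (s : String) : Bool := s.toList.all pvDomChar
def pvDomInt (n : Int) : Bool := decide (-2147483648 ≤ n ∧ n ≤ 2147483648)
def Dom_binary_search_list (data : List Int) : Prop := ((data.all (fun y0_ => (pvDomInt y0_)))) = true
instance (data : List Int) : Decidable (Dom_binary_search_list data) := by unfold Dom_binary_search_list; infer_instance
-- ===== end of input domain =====

-- B replaces A's recursive slice-and-re-sort scheme by one sort plus an explicit-stack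
-- iteration over index ranges (alternative decomposition, same return value).
-- Both Pythons mutate the argument via data.sort(); the equivalence proved is about the return value
-- (the mutation side effect is identical in A and B).

-- termination facts for the ports (cited by name in decreasing_by)
theorem bsl_dec_left (data : List Int)
    (h0 : ¬(PySem.List.sorted data (fun x => x) false).length = 0)
    (h1 : ¬(PySem.List.sorted data (fun x => x) false).length = 1) :
    (List.take ((PySem.List.sorted data (fun x => x) false).length / 2)
      (PySem.List.sorted data (fun x => x) false)).length < data.length := by
  have h0' := h0; have h1' := h1
  simp only [PySem.List.length_sorted] at h0' h1'
  simp only [List.length_take, PySem.List.length_sorted]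
  omega

theorem bsl_dec_right (data : List Int)
    (h0 : ¬(PySem.List.sorted data (fun x => x) false).length = 0)
    (h1 : ¬(PySem.List.sorted data (fun x => x) false).length = 1) :
    (List.drop ((PySem.List.sorted data (fun x => x) false).length / 2 + 1)
      (PySem.List.sorted data (fun x => x) false)).length < data.length := by
  have h0' := h0; have h1' := h1
  simp only [PySem.List.length_sorted] at h0' h1'
  simp only [List.length_drop, PySem.List.length_sorted]
  omega

theorem bslLoop_dec_skip (lo hi : Int) (st : List (Int × Int)) :
    (st.map (fun p => 2 * (p.2 - p.1).toNat + 1)).sum <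
      (((lo, hi) :: st).map (fun p => 2 * (p.2 - p.1).toNat + 1)).sum := by
  simp only [List.map_cons, List.sum_cons]; omega

theorem bslLoop_dec_split (lo hi : Int) (st : List (Int × Int)) (h : ¬ hi ≤ lo) :
    (((lo, lo + PySem.Int.floordiv (hi - lo) 2) ::
        (lo + PySem.Int.floordiv (hi - lo) 2 + 1, hi) :: st).map
      (fun p => 2 * (p.2 - p.1).toNat + 1)).sum <
      (((lo, hi) :: st).map (fun p => 2 * (p.2 - p.1).toNat + 1)).sum := by
  simp only [List.map_cons, List.sum_cons]
  rw [PySem.Int.floordiv_eq_ediv_of_pos (by omega)]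
  omega

-- ===== PORT A =====
-- data.sort() mutates; the port works on the sorted list d from then on.
-- data[mid] and data[0] are in range here, so pyGetD with default 0 is exact;
-- length // 2 on a Nat length is Nat division (exact for Python's //);
-- data[:mid] = take mid and data[mid+1:] = drop (mid+1) (nonneg indices: PySem.List.slice_to/slice_from).
def binary_search_list (data : List Int) : List Int :=
  let d := PySem.List.sorted data (fun x => x) false
  if h0 : d.length = 0 then []
  else if h1 : d.length = 1 then [PySem.List.pyGetD d 0 0]
  else
    PySem.List.pyGetD d ((d.length / 2 : Nat) : Int) 0 ::
      (binary_search_list (d.take (d.length / 2)) ++ binary_search_list (d.drop (d.length / 2 + 1)))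
termination_by data.length
decreasing_by
  · exact bsl_dec_left data h0 h1
  · exact bsl_dec_right data h0 h1

-- ===== PORT B =====
-- the while-loop over the explicit stack (head of the list = top of the stack);
-- data[mid] is in range whenever popped, so pyGetD with default 0 is exact.
def bslLoop (d : List Int) (stack : List (Int × Int)) (result : List Int) : List Int :=
  match stack with
  | [] => result
  | (lo, hi) :: st =>
      if hi ≤ lo then bslLoop d st result
      else
        let mid := lo + PySem.Int.floordiv (hi - lo) 2
        bslLoop d ((lo, mid) :: (mid + 1, hi) :: st)
          (result ++ [PySem.List.pyGetD d mid 0])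
termination_by (stack.map (fun p => 2 * (p.2 - p.1).toNat + 1)).sum
decreasing_by
  · exact bslLoop_dec_skip lo hi st
  · exact bslLoop_dec_split lo hi st (by assumption)

def binary_search_list_alt (data : List Int) : List Int :=
  let d := PySem.List.sorted data (fun x => x) false
  bslLoop d [(0, (d.length : Int))] []

-- ===== PRECONDITION & SPEC =====
def Spec_binary_search_list (data : List Int) (out : List Int) : Prop := out = binary_search_list_alt data
instance (data : List Int) (out : List Int) : Decidable (Spec_binary_search_list data out) := by unfold Spec_binary_search_list; infer_instance

-- ===== CLAIM (what is proved, stated in full; the proofs are below) =====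
def Claim_equal_binary_search_list : Prop := ∀ (data : List Int), Dom_binary_search_list data → Spec_binary_search_list data (binary_search_list data)

-- ===== LEMMAS AND PROOFS =====

-- preorder of the implicit balanced BST over the index range [lo, hi) of d
def buildI (d : List Int) (lo hi : Int) : List Int :=
  if hi ≤ lo then []
  else
    let mid := lo + (hi - lo) / 2
    PySem.List.pyGetD d mid 0 :: (buildI d lo mid ++ buildI d (mid + 1) hi)
termination_by (hi - lo).toNat
decreasing_by
  · omega
  · omega

theorem buildI_of_le {d : List Int} {lo hi : Int} (h : hi ≤ lo) : buildI d lo hi = [] := by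
  unfold buildI; simp [h]

theorem buildI_of_lt {d : List Int} {lo hi : Int} (h : lo < hi) :
    buildI d lo hi = PySem.List.pyGetD d (lo + (hi - lo) / 2) 0 ::
      (buildI d lo (lo + (hi - lo) / 2) ++ buildI d (lo + (hi - lo) / 2 + 1) hi) := by
  conv_lhs => unfold buildI
  simp [Int.not_le.mpr h]

theorem bslLoop_eq (d : List Int) (stack : List (Int × Int)) (result : List Int) :
    bslLoop d stack result = result ++ (stack.map (fun p => buildI d p.1 p.2)).flatten := by
  fun_induction bslLoop d stack result
  case case1 => simp
  case case2 lo hi st hle ih => rw [ih]; simp [buildI_of_le hle]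
  case case3 lo hi st hnle mid ih =>
    have hm : mid = lo + (hi - lo) / 2 := by
      have h : mid = lo + PySem.Int.floordiv (hi - lo) 2 := rfl
      rw [h, PySem.Int.floordiv_eq_ediv_of_pos (by omega)]
    rw [ih]
    simp only [List.map_cons, List.flatten_cons]
    rw [show buildI d lo hi = _ from buildI_of_lt (by omega), ← hm]
    simp

theorem A_on_range (d : List Int) (hs : d.Pairwise (· ≤ ·)) :
    ∀ (n lo hi : Nat), lo ≤ hi → hi ≤ d.length → hi - lo = n →
    binary_search_list ((d.drop lo).take (hi - lo)) = buildI d (lo : Int) (hi : Int) := by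
  intro n
  induction n using Nat.strong_induction_on with
  | _ n ih =>
    intro lo hi hlohi hhid hn
    have hsubl : ((d.drop lo).take (hi - lo)).Sublist d :=
      ((d.drop lo).take_sublist _).trans (d.drop_sublist lo)
    have hp : ((d.drop lo).take (hi - lo)).Pairwise (fun a b => a ≤ b) := hs.sublist hsubl
    have hlen : ((d.drop lo).take (hi - lo)).length = n := by
      simp only [List.length_take, List.length_drop]; omega
    conv_lhs => unfold binary_search_list
    norm_num only
    rw [PySem.List.sorted_eq_self_of_pairwise _ _ hp]
    simp only [hlen]
    by_cases h0 : n = 0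
    · rw [dif_pos h0, buildI_of_le (by omega)]
    · rw [dif_neg h0]
      by_cases h1 : n = 1
      · rw [dif_pos h1, buildI_of_lt (by omega)]
        have hm : (lo : Int) + ((hi : Int) - lo) / 2 = lo := by omega
        rw [hm, buildI_of_le (by omega), buildI_of_le (by omega)]
        have hidx : PySem.List.pyGetD ((d.drop lo).take (hi - lo)) 0 0 = d[lo]'(by omega) := by
          rw [PySem.List.pyGetD_eq_getElem _ _ (by omega) (by simp; omega)]
          simp [List.getElem_take, List.getElem_drop]
        have hidx2 : PySem.List.pyGetD d (lo : Int) 0 = d[lo]'(by omega) := by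
          rw [PySem.List.pyGetD_eq_getElem _ _ (by omega) (by simp; omega)]
          simp only [Int.toNat_natCast]
        rw [hidx, hidx2]
        simp
      · rw [dif_neg h1]
        rw [buildI_of_lt (by omega)]
        have hk2 : n / 2 < n := by omega
        have hk3 : n - (n / 2 + 1) < n := by omega
        -- midpoint as a Nat
        have hm : (lo : Int) + ((hi : Int) - lo) / 2 = ((lo + n / 2 : Nat) : Int) := by omega
        -- left recursive call
        have htake : ((d.drop lo).take (hi - lo)).take (n / 2)
            = (d.drop lo).take ((lo + n / 2) - lo) := by
          rw [List.take_take]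
          congr 1
          omega
        have hL := ih (n / 2) hk2 lo (lo + n / 2) (by omega) (by omega) (by omega)
        -- right recursive call
        have hdrop : ((d.drop lo).take (hi - lo)).drop (n / 2 + 1)
            = (d.drop (lo + n / 2 + 1)).take (hi - (lo + n / 2 + 1)) := by
          rw [List.drop_take, List.drop_drop]
          congr 1
          omega
        have hR := ih (n - (n / 2 + 1)) hk3 (lo + n / 2 + 1) hi (by omega) (by omega) (by omega)
        -- the root element
        have hidx : PySem.List.pyGetD ((d.drop lo).take (hi - lo)) ((n / 2 : Nat) : Int) 0
            = d[lo + n / 2]'(by omega) := by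
          rw [PySem.List.pyGetD_eq_getElem _ _ (by omega) (by simp; omega)]
          simp only [Int.toNat_natCast, List.getElem_take, List.getElem_drop]
        have hidx2 : PySem.List.pyGetD d ((lo + n / 2 : Nat) : Int) 0 = d[lo + n / 2]'(by omega) := by
          rw [PySem.List.pyGetD_eq_getElem _ _ (by omega) (by simp; omega)]
          simp only [Int.toNat_natCast]
        rw [htake, hdrop, hL, hR, hidx, hm, hidx2]
        norm_cast

-- ===== VERDICT (by name: the statement is the Claim_ definition above) =====

theorem A_resort (data : List Int) :
    binary_search_list data = binary_search_list (PySem.List.sorted data (fun x => x) false) := by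
  conv_lhs => unfold binary_search_list
  conv_rhs => unfold binary_search_list
  simp only [PySem.List.sorted_sorted]

-- ===== VERDICT (by name: the statement is the Claim_ definition above) =====
theorem binary_search_list_spec : Claim_equal_binary_search_list := by
  intro data _
  unfold Spec_binary_search_list binary_search_list_alt
  rw [bslLoop_eq]
  simp only [List.map_cons, List.map_nil, List.flatten_cons, List.flatten_nil, List.nil_append,
    List.append_nil]
  rw [A_resort]
  have h := A_on_range (PySem.List.sorted data (fun x => x) false)
    (PySem.List.sorted_pairwise data (fun x => x))
    (PySem.List.sorted data (fun x => x) false).length 0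
    (PySem.List.sorted data (fun x => x) false).length
    (Nat.zero_le _) (le_refl _) rfl
  rw [List.drop_zero] at h
  rw [Nat.sub_zero] at h
  rw [List.take_length] at h
  rw [show ((0:Nat):Int) = (0:Int) from rfl] at h
  rw [h, PySem.List.length_sorted]
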